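-- pv_equiv track=rewrite | github.com/ldenti/benchHG | scripts/get_loci.py | find_unique_kmer
-- ===== SOURCE A (Python) =====
-- def find_unique_kmer(seq, k, from_start):
--     KMERS = {}
--     for i in range(len(seq) - k + 1):
--         kmer = seq[i : i + k]
--         if kmer not in KMERS:
--             KMERS[kmer] = i
--         else:
--             KMERS[kmer] = -1
--     for kmer in KMERS if from_start else reversed(KMERS):
--         if KMERS[kmer] != -1:
--             return KMERS[kmer] if from_start else KMERS[kmer] + k
--     return 0 if from_start else len(seq)
-- ===== SOURCE B (Python) =====
-- def occurs_twice(seq, k, kmer, last):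
--     seen = False
--     for j in range(last):
--         if seq[j : j + k] == kmer:
--             if seen:
--                 return True
--             seen = True
--     return False
--
--
-- def find_unique_kmer(seq, k, from_start):
--     n = len(seq)
--     last = n - k + 1
--     rng = range(last) if from_start else reversed(range(last))
--     for i in rng:
--         if not occurs_twice(seq, k, seq[i : i + k], last):
--             return i if from_start else i + k
--     return 0 if from_start else n
-- ===== Notes on version B (the rewrite author's own statement) =====
-- stated objective: simpler
-- what changed: B drops A's sentinel dictionary and its scan over dict insertion order entirely: it scans positions directly in the requested direction and tests each k-mer's uniqueness by counting its occurrences with a nested brute-force scan (no table is ever built).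
import Mathlib
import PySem

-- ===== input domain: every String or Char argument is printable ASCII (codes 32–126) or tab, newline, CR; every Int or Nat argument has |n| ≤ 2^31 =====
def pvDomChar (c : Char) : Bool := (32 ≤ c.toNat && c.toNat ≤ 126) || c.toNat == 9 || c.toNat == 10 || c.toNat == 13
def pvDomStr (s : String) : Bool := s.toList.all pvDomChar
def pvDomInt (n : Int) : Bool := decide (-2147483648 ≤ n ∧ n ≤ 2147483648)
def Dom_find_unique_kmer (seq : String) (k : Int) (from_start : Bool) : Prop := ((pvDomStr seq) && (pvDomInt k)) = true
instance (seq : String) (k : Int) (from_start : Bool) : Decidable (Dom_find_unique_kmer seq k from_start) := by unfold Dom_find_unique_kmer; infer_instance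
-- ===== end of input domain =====

-- B drops A's sentinel dictionary and its scan over dict insertion order: it scans positions
-- directly in the requested direction and tests each k-mer's uniqueness by counting its
-- occurrences with a nested brute-force scan; simpler, not faster, proved equal everywhere.

-- ===== PORT A =====
-- the second Python loop 'for kmer in KMERS / reversed(KMERS): if KMERS[kmer] != -1: return …'
def scanA (d : PySem.Dict (List Char) Int) (k dflt : Int) (from_start : Bool) : List (List Char) → Int
  | [] => dflt
  | w :: rest =>
      let v := d.getD w (-1)
      if v ≠ -1 then (if from_start then v else v + k) else scanA d k dflt from_start rest

def find_unique_kmer (seq : String) (k : Int) (from_start : Bool) : Int :=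
  let s := seq.toList
  let n : Int := (PySem.Str.len seq : Int)
  let KMERS : PySem.Dict (List Char) Int :=
    (PySem.List.pyRange 0 (n - k + 1) 1).foldl
      (fun d i =>
        let kmer := PySem.List.slice s (some i) (some (i + k))
        if d.contains kmer then d.insert kmer (-1) else d.insert kmer i)
      PySem.Dict.empty
  scanA KMERS k (if from_start then 0 else n) from_start
    (if from_start then KMERS.keys else KMERS.keys.reverse)

-- ===== PORT B =====
-- Python helper 'occurs_twice': scan range(last) with a 'seen' flag, early-return at second match
def occursTwice (s : List Char) (k : Int) (kmer : List Char) (seen : Bool) : List Int → Bool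
  | [] => false
  | j :: rest =>
      if PySem.List.slice s (some j) (some (j + k)) == kmer then
        if seen then true else occursTwice s k kmer true rest
      else occursTwice s k kmer seen rest

def find_unique_kmer_alt (seq : String) (k : Int) (from_start : Bool) : Int :=
  let s := seq.toList
  let n : Int := (PySem.Str.len seq : Int)
  let last := n - k + 1
  let positions := PySem.List.pyRange 0 last 1
  let rng := if from_start then positions else positions.reverse
  match rng.find? (fun i =>
      !occursTwice s k (PySem.List.slice s (some i) (some (i + k))) false positions) with
  | some i => if from_start then i else i + k
  | none => if from_start then 0 else n

-- ===== PRECONDITION & SPEC =====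
def Spec_find_unique_kmer (seq : String) (k : Int) (from_start : Bool) (out : Int) : Prop := out = find_unique_kmer_alt seq k from_start
instance (seq : String) (k : Int) (from_start : Bool) (out : Int) : Decidable (Spec_find_unique_kmer seq k from_start out) := by unfold Spec_find_unique_kmer; infer_instance

-- ===== CLAIM (what is proved, stated in full; the proofs are below) =====
def Claim_equal_find_unique_kmer : Prop := ∀ (seq : String) (k : Int) (from_start : Bool), Dom_find_unique_kmer seq k from_start → Spec_find_unique_kmer seq k from_start (find_unique_kmer seq k from_start)

-- ===== LEMMAS AND PROOFS =====

-- A's dict-building loop, abstracted over the k-mer function f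
def buildD (f : Int → List Char) (xs : List Int) : PySem.Dict (List Char) Int :=
  xs.foldl (fun d i => if d.contains (f i) then d.insert (f i) (-1) else d.insert (f i) i)
    PySem.Dict.empty

-- the first index i in xs with f i = w (A's stored value for a unique k-mer w), -1 if none
def firstIdx (f : Int → List Char) (xs : List Int) (w : List Char) : Int :=
  match xs.find? (fun i => f i == w) with
  | some i => i
  | none => -1

lemma buildD_if_push (f : Int → List Char) :
    (fun (d : PySem.Dict (List Char) Int) i =>
        if d.contains (f i) then d.insert (f i) (-1) else d.insert (f i) i)
      = fun d i => d.insert (f i) (if d.contains (f i) then -1 else i) := by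
  funext d i; exact (apply_ite (d.insert (f i)) _ _ _).symm

lemma buildD_keys (f : Int → List Char) (xs : List Int) :
    (buildD f xs).keys = PySem.Set.ofList (xs.map f) := by
  unfold buildD
  rw [buildD_if_push f, PySem.Dict.keys_foldl_insert_key]
  simp [PySem.Set.ofList_eq_foldl, PySem.Set.update, PySem.Dict.keys_empty]

lemma buildD_get? (f : Int → List Char) (xs : List Int) (w : List Char) :
    (buildD f xs).get? w =
      if (xs.map f).count w = 0 then none
      else some (if (xs.map f).count w = 1 then firstIdx f xs w else -1) := by
  induction xs using List.reverseRecOn generalizing w with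
  | nil => simp [buildD, PySem.Dict.get?_empty]
  | append_singleton t a ih =>
    have hstep : buildD f (t ++ [a]) =
        (if (buildD f t).contains (f a) then (buildD f t).insert (f a) (-1)
         else (buildD f t).insert (f a) a) := by
      unfold buildD; rw [List.foldl_append]; rfl
    have hcontains : (buildD f t).contains (f a) = ((t.map f).count (f a) != 0) := by
      rw [PySem.Dict.contains_eq_isSome_get?]
      rw [ih (f a)]
      by_cases h : (t.map f).count (f a) = 0 <;> simp [h]
    by_cases hw : w = f a
    · subst hw
      by_cases h0 : (t.map f).count (f a) = 0
      · have hfind : t.find? (fun i => f i == f a) = none := by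
          apply List.find?_eq_none.mpr
          intro i hi hp
          have hm : f i ∈ t.map f := List.mem_map_of_mem hi
          rw [List.count_eq_zero] at h0
          exact h0 (by rwa [eq_of_beq hp] at hm)
        have hfi : firstIdx f (t ++ [a]) (f a) = a := by
          unfold firstIdx
          rw [List.find?_append, hfind]
          simp
        rw [hstep, hcontains]
        simp only [h0]
        rw [show ((0:Nat) != 0) = false from rfl]
        simp only [if_false, Bool.false_eq_true, PySem.Dict.get?_insert_self]
        have hc : ((t ++ [a]).map f).count (f a) = 1 := by
          simp [List.count_append, h0]
        rw [if_neg (by omega), if_pos hc, hfi]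
      · rw [hstep, hcontains]
        have hb : ((t.map f).count (f a) != 0) = true := by simpa using h0
        rw [hb]
        simp only [if_true, PySem.Dict.get?_insert_self]
        have hc1 : ((t ++ [a]).map f).count (f a) ≠ 0 := by
          simp [List.count_append]
        have hc2 : ((t ++ [a]).map f).count (f a) ≠ 1 := by
          simp only [List.map_append, List.count_append, List.map_cons, List.map_nil]
          simp
          omega
        rw [if_neg hc1, if_neg hc2]
    · have hne : w ≠ f a := hw
      have hcount : ((t ++ [a]).map f).count w = (t.map f).count w := by
        simp [List.count_append, Ne.symm hne]
      have hfi : firstIdx f (t ++ [a]) w = firstIdx f t w := by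
        unfold firstIdx
        rw [List.find?_append]
        have hnone : List.find? (fun i => f i == w) [a] = none := by
          simp only [List.find?]
          have hfa : (f a == w) = false := by
            simpa using fun h => absurd h.symm hne
          rw [hfa]
        rw [hnone]
        cases t.find? (fun i => f i == w) <;> rfl
      rw [hstep]
      by_cases hc : (buildD f t).contains (f a) <;>
        simp only [hc, if_true, if_false, Bool.false_eq_true,
          PySem.Dict.get?_insert_of_ne _ _ hne, ih w, hcount, hfi]

lemma filter_ofList (p : List Char → Bool) (ys acc : List (List Char))
    (h : ∀ w, p w = true → (acc ++ ys).count w ≤ 1) :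
    (PySem.Set.update acc ys).filter p = acc.filter p ++ ys.filter p := by
  induction ys generalizing acc with
  | nil => simp [PySem.Set.update]
  | cons y t ih =>
    have hstep : PySem.Set.update acc (y :: t) = PySem.Set.update (PySem.Set.add acc y) t := rfl
    rw [hstep]
    by_cases hy : PySem.Set.contains acc y = true
    · have hadd : PySem.Set.add acc y = acc := by simp only [PySem.Set.add, hy, if_true]
      have hpy : p y = false := by
        by_contra hp
        have hp' : p y = true := by simpa using hp
        have := h y hp'
        have hyc : 1 ≤ acc.count y := List.one_le_count_iff.mpr (by simpa [PySem.Set.contains] using hy)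
        simp [List.count_append, List.count_cons_self] at this
        omega
      rw [hadd, ih acc (by
        intro w hw
        have := h w hw
        simp only [List.count_append, List.count_cons] at this ⊢
        omega)]
      simp [hpy]
    · have hadd : PySem.Set.add acc y = acc ++ [y] := by
        simp only [PySem.Set.add, hy, if_false, Bool.false_eq_true]
      rw [hadd, ih (acc ++ [y]) (by
        intro w hw
        have := h w hw
        simp only [List.count_append, List.count_cons, List.count_nil] at this ⊢
        omega)]
      simp [List.filter_append, List.filter_cons]
      by_cases hpy : p y <;> simp [hpy]

lemma scanA_eq (d : PySem.Dict (List Char) Int) (k dflt : Int) (fs : Bool) (L : List (List Char)) :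
    scanA d k dflt fs L =
      match L.find? (fun w => d.getD w (-1) != -1) with
      | some w => if fs then d.getD w (-1) else d.getD w (-1) + k
      | none => dflt := by
  induction L with
  | nil => rfl
  | cons w rest ih =>
    by_cases hv : d.getD w (-1) = -1
    · simp [scanA, hv, ih]
    · simp [scanA, hv]

lemma unique_elem (f : Int → List Char) (xs : List Int) (i : Int)
    (hi : i ∈ xs) (h1 : (xs.map f).count (f i) = 1) :
    ∀ j ∈ xs, f j = f i → j = i := by
  intro j hj hfj
  have hcp : xs.countP (fun x => f x == f i) = 1 := by
    rw [List.count_eq_countP] at h1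
    have := List.countP_map (p := fun x => x == f i) (f := f) (l := xs)
    rw [this] at h1
    simpa using h1
  rw [List.countP_eq_length_filter] at hcp
  obtain ⟨x, hx⟩ := List.length_eq_one_iff.mp hcp
  have hjm : j ∈ xs.filter (fun x => f x == f i) :=
    List.mem_filter.mpr ⟨hj, by simp [hfj]⟩
  have him : i ∈ xs.filter (fun x => f x == f i) :=
    List.mem_filter.mpr ⟨hi, by simp⟩
  rw [hx] at hjm him
  simp at hjm him
  rw [hjm, him]

lemma firstIdx_of_count_one (f : Int → List Char) (xs : List Int) (i : Int)
    (hi : i ∈ xs) (h1 : (xs.map f).count (f i) = 1) :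
    firstIdx f xs (f i) = i := by
  unfold firstIdx
  cases hfind : xs.find? (fun j => f j == f i) with
  | none =>
    exact absurd (List.find?_eq_none.mp hfind i hi (by simp)) (by simp)
  | some j =>
    exact unique_elem f xs i hi h1 j (List.mem_of_find?_eq_some hfind)
      (by simpa using List.find?_some hfind)

lemma getD_of_count_one (f : Int → List Char) (xs : List Int) (i : Int)
    (hi : i ∈ xs) (h1 : (xs.map f).count (f i) = 1) :
    (buildD f xs).getD (f i) (-1) = i := by
  rw [PySem.Dict.getD_eq_get?_getD, buildD_get?, if_neg (by omega), if_pos h1,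
    firstIdx_of_count_one f xs i hi h1]
  rfl

lemma getD_ne_neg_one_iff (f : Int → List Char) (xs : List Int)
    (hpos : ∀ i ∈ xs, 0 ≤ i) (w : List Char) (hw : (xs.map f).count w ≠ 0) :
    ((buildD f xs).getD w (-1) != -1) = ((xs.map f).count w == 1) := by
  rw [PySem.Dict.getD_eq_get?_getD, buildD_get?, if_neg hw]
  by_cases h1 : (xs.map f).count w = 1
  · rw [if_pos h1]
    obtain ⟨i, hi, hfi⟩ : ∃ i ∈ xs, f i = w := by
      have : w ∈ xs.map f := List.count_pos_iff.mp (by omega)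
      simpa using this
    subst hfi
    rw [firstIdx_of_count_one f xs i hi h1]
    have := hpos i hi
    simp [h1]
    omega
  · rw [if_neg h1]
    simp [h1]

-- the whole equivalence, abstracted over xs (the index range) and f (the k-mer at an index)
lemma main_abstract (f : Int → List Char) (xs : List Int) (hpos : ∀ i ∈ xs, 0 ≤ i)
    (k dflt : Int) (fs : Bool) :
    scanA (buildD f xs) k dflt fs
        (if fs then (buildD f xs).keys else (buildD f xs).keys.reverse) =
      match (if fs then xs else xs.reverse).find?
          (fun i => (xs.countP (fun j => f j == f i)) == 1) with
      | some i => if fs then i else i + k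
      | none => dflt := by
  have hp : (fun i => (xs.countP (fun j => f j == f i)) == 1)
      = fun i => ((xs.map f).count (f i) == 1) := by
    funext i
    rw [List.count_eq_countP, List.countP_map]
    rfl
  rw [hp, scanA_eq]
  -- rewrite A's key-scan predicate to the count predicate on the keys it visits
  have hmemkeys : ∀ w ∈ (buildD f xs).keys, (xs.map f).count w ≠ 0 := by
    intro w hw
    rw [buildD_keys] at hw
    have hmem : w ∈ xs.map f := by simpa [pysem] using hw
    have := List.count_pos_iff.mpr hmem
    omega
  have hfilter : ((buildD f xs).keys.filter (fun w => (xs.map f).count w == 1))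
      = (xs.map f).filter (fun w => (xs.map f).count w == 1) := by
    rw [buildD_keys]
    have h := filter_ofList (fun w => (xs.map f).count w == 1) (xs.map f) []
      (by intro w hw; simpa using Nat.le_of_eq (by simpa using hw))
    simpa [PySem.Set.ofList_eq_foldl, PySem.Set.update] using h
  have hcongr : ∀ (L : List (List Char)), (∀ w ∈ L, w ∈ (buildD f xs).keys) →
      L.find? (fun w => (buildD f xs).getD w (-1) != -1)
        = L.find? (fun w => (xs.map f).count w == 1) := by
    intro L hL
    rw [← List.head?_filter, ← List.head?_filter,
      List.filter_congr (fun w hw => getD_ne_neg_one_iff f xs hpos w (hmemkeys w (hL w hw)))]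
  cases fs with
  | true =>
    simp only [if_true]
    rw [hcongr (buildD f xs).keys (fun w hw => hw), ← List.head?_filter, hfilter,
      List.head?_filter, List.find?_map]
    simp only [Function.comp_def]
    cases hfind : xs.find? (fun i => (xs.map f).count (f i) == 1) with
    | none => simp
    | some i =>
      simp only [Option.map_some]
      have hi : i ∈ xs := List.mem_of_find?_eq_some hfind
      have h1 : (xs.map f).count (f i) = 1 := by simpa using List.find?_some hfind
      simp [getD_of_count_one f xs i hi h1]
  | false =>
    simp only [Bool.false_eq_true, if_false]
    rw [hcongr (buildD f xs).keys.reverse (fun w hw => List.mem_reverse.mp hw),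
      ← List.head?_filter, List.filter_reverse, hfilter, ← List.filter_reverse,
      List.head?_filter, ← List.map_reverse, List.find?_map]
    simp only [Function.comp_def]
    cases hfind : xs.reverse.find? (fun i => (xs.map f).count (f i) == 1) with
    | none => simp
    | some i =>
      simp only [Option.map_some]
      have hi : i ∈ xs := List.mem_reverse.mp (List.mem_of_find?_eq_some hfind)
      have h1 : (xs.map f).count (f i) = 1 := by simpa using List.find?_some hfind
      simp [getD_of_count_one f xs i hi h1]

lemma occursTwice_eq (s : List Char) (k : Int) (w : List Char) (seen : Bool) (xs : List Int) :
    occursTwice s k w seen xs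
      = decide (2 ≤ xs.countP (fun j => PySem.List.slice s (some j) (some (j + k)) == w)
                  + (if seen then 1 else 0)) := by
  induction xs generalizing seen with
  | nil => cases seen <;> simp [occursTwice]
  | cons j t ih =>
    by_cases h : (PySem.List.slice s (some j) (some (j + k)) == w) = true
    · cases seen <;> simp [occursTwice, h, ih]
    · simp only [occursTwice, h, Bool.false_eq_true, if_false, ih, List.countP_cons]
      simp

-- ===== VERDICT (by name: the statement is the Claim_ definition above) =====
theorem find_unique_kmer_spec : Claim_equal_find_unique_kmer := by
  intro seq k from_start _
  unfold Spec_find_unique_kmer find_unique_kmer find_unique_kmer_alt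
  have hmain := main_abstract (fun i => PySem.List.slice seq.toList (some i) (some (i + k)))
    (PySem.List.pyRange 0 ((PySem.Str.len seq : Int) - k + 1) 1)
    (fun i hi => by
      have := (PySem.List.mem_pyRange_one.mp hi).1
      omega)
    k (if from_start then 0 else (PySem.Str.len seq : Int)) from_start
  have hfind : ∀ (L : List Int),
      (∀ i ∈ L, i ∈ PySem.List.pyRange 0 ((PySem.Str.len seq : Int) - k + 1) 1) →
      L.find? (fun i =>
          !occursTwice seq.toList k (PySem.List.slice seq.toList (some i) (some (i + k))) false
            (PySem.List.pyRange 0 ((PySem.Str.len seq : Int) - k + 1) 1))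
        = L.find? (fun i =>
            ((PySem.List.pyRange 0 ((PySem.Str.len seq : Int) - k + 1) 1).countP
              (fun j => PySem.List.slice seq.toList (some j) (some (j + k))
                          == PySem.List.slice seq.toList (some i) (some (i + k))) == 1)) := by
    intro L hL
    rw [← List.head?_filter, ← List.head?_filter]
    congr 1
    apply List.filter_congr
    intro i hi
    have hc1 : 1 ≤ (PySem.List.pyRange 0 ((PySem.Str.len seq : Int) - k + 1) 1).countP
        (fun j => PySem.List.slice seq.toList (some j) (some (j + k))
                    == PySem.List.slice seq.toList (some i) (some (i + k))) :=
      List.countP_pos_iff.mpr ⟨i, hL i hi, by simp⟩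
    rw [occursTwice_eq]
    generalize (PySem.List.pyRange 0 ((PySem.Str.len seq : Int) - k + 1) 1).countP
        (fun j => PySem.List.slice seq.toList (some j) (some (j + k))
                    == PySem.List.slice seq.toList (some i) (some (i + k))) = c at hc1 ⊢
    by_cases h2 : 2 ≤ c
    · have : c ≠ 1 := by omega
      simp [h2, this]
    · have : c = 1 := by omega
      simp [this]
  cases from_start with
  | true =>
    simp only [if_true] at hmain
    rw [← hfind _ (fun i hi => hi)] at hmain
    simpa [buildD] using hmain
  | false =>
    simp only [Bool.false_eq_true, if_false] at hmain
    rw [← hfind _ (fun i hi => List.mem_reverse.mp hi)] at hmain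
    simpa [buildD] using hmain
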